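-- pv_equiv track=rewrite | github.com/yuitokyouni/JWFE | japan-financial-world/tests/test_stress_applications.py | _strip_docstrings
-- ===== SOURCE A (Python) =====
-- def _strip_docstrings(text: str) -> str:
--     """Strip every triple-quoted docstring (handles class /
--     method docstrings, not just the module-level one)."""
--     out: list[str] = []
--     i = 0
--     while True:
--         lo = text.find('"""', i)
--         if lo < 0:
--             out.append(text[i:])
--             break
--         out.append(text[i:lo])
--         hi = text.find('"""', lo + 3)
--         if hi < 0:
--             out.append(text[lo:])
--             break
--         i = hi + 3
--     return "".join(out)
-- ===== SOURCE B (Python) =====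
-- def _strip_docstrings(text: str) -> str:
--     parts = text.split('"""')
--     kept = [p for i, p in enumerate(parts) if i % 2 == 0]
--     if len(parts) % 2 == 0:
--         kept.append('"""' + parts[-1])
--     return "".join(kept)
-- ===== Notes on version B (the rewrite author's own statement) =====
-- stated objective: simpler
-- what changed: Replaces A's index-tracking while loop with two find calls per iteration by a single split on the triple-quote delimiter that keeps the even-indexed pieces and re-attaches a dangling unterminated opener.
import Mathlib
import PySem

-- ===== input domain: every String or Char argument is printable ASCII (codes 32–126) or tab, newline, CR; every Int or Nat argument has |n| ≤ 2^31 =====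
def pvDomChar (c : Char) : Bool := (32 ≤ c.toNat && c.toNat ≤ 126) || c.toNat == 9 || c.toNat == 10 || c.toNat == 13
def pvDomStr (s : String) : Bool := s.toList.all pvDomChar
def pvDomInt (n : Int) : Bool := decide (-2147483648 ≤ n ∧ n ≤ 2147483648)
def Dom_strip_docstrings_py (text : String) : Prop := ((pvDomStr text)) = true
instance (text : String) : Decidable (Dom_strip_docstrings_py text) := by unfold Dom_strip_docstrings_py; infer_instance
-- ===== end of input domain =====

-- B replaces A's find-driven while loop by a single split on the triple-quote delimiter keeping the
-- even-indexed pieces (re-attaching a dangling opener); objective: simpler.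

-- the triple-quote delimiter '"""'
def pvTQ : List Char := ['"', '"', '"']

-- ===== PORT A =====
-- A's while loop, as structural recursion on the not-yet-consumed suffix of the text
-- (the loop state 'i' becomes the suffix 'text[i:]'; both 'text.find' calls are kept).
def stripLoopA (s : List Char) : List (List Char) :=
  if _h1 : PySem.Chars.find s pvTQ < 0 then [s]
  else
    if PySem.Chars.findFrom s pvTQ (PySem.Chars.find s pvTQ + 3) none < 0 then
      [s.take (PySem.Chars.find s pvTQ).toNat, s.drop (PySem.Chars.find s pvTQ).toNat]
    else
      s.take (PySem.Chars.find s pvTQ).toNat ::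
        stripLoopA (s.drop ((PySem.Chars.findFrom s pvTQ (PySem.Chars.find s pvTQ + 3) none).toNat + 3))
termination_by s.length
decreasing_by
  have hinf : pvTQ <:+: s := (PySem.Chars.find_nonneg_iff s pvTQ).mp (by omega)
  have hlen : pvTQ.length ≤ s.length := hinf.length_le
  simp only [List.length_drop]
  have : (3 : Nat) ≤ s.length := hlen
  omega

def strip_docstrings_py (text : String) : String :=
  String.ofList (PySem.Chars.join [] (stripLoopA text.toList))

-- ===== PORT B =====
def strip_docstrings_py_alt (text : String) : String :=
  let parts := PySem.Chars.splitOn text.toList pvTQ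
  let kept := ((PySem.List.enumerate parts).filter (fun ip => PySem.Int.mod ip.1 2 == 0)).map (·.2)
  let kept2 := if parts.length % 2 == 0 then kept ++ [pvTQ ++ PySem.List.pyGetD parts (-1) []] else kept
  String.ofList (PySem.Chars.join [] kept2)

-- ===== PRECONDITION & SPEC =====
def Spec_strip_docstrings_py (text : String) (out : String) : Prop := out = strip_docstrings_py_alt text
instance (text : String) (out : String) : Decidable (Spec_strip_docstrings_py text out) := by unfold Spec_strip_docstrings_py; infer_instance

-- ===== CLAIM (what is proved, stated in full; the proofs are below) =====
def Claim_equal_strip_docstrings_py : Prop := ∀ (text : String), Dom_strip_docstrings_py text → Spec_strip_docstrings_py text (strip_docstrings_py text)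

-- ===== LEMMAS AND PROOFS =====

-- apply f to the head of a list, if any
def mapHead {α : Type} (f : α → α) : List α → List α
  | [] => []
  | a :: r => f a :: r

-- the even-indexed elements of a list
def evens {α : Type} : List α → List α
  | [] => []
  | [a] => [a]
  | a :: _ :: r => a :: evens r

-- reference split: scan for pvTQ, cut it out, recurse
def splits : List Char → List (List Char)
  | [] => [[]]
  | l@(c :: rest) =>
    if pvTQ.isPrefixOf l then [] :: splits (l.drop 3)
    else mapHead (c :: ·) (splits rest)
termination_by l => l.length
decreasing_by
  all_goals simp_all [List.length_drop]

-- what B computes, as a function of the split pieces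
def bOf (parts : List (List Char)) : List Char :=
  if parts.length % 2 == 0 then
    (evens parts).flatten ++ pvTQ ++ (parts.getLast?.getD [])
  else (evens parts).flatten

lemma splits_ne_nil (l : List Char) : splits l ≠ [] := by
  fun_induction splits l with
  | case1 => simp
  | case2 c rest h ih => simp
  | case3 c rest h ih =>
    cases hs : splits rest with
    | nil => exact absurd hs ih
    | cons a r => simp [mapHead]

lemma go_eq (fuel : Nat) (l cur : List Char) (acc : List (List Char)) (h : l.length < fuel) :
    PySem.Chars.splitOn.go pvTQ fuel l cur acc = acc.reverse ++ mapHead (fun t => cur.reverse ++ t) (splits l) := by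
  induction fuel generalizing l cur acc with
  | zero => omega
  | succ fuel ih =>
    cases l with
    | nil =>
      rw [PySem.Chars.splitOn.go]
      · simp [splits, mapHead]
      · omega
    | cons c rest =>
      rw [PySem.Chars.splitOn.go]
      by_cases hp : pvTQ.isPrefixOf (c :: rest)
      · rw [if_pos hp, ih _ _ _ (by simp [pvTQ] at h ⊢; omega)]
        have hs : splits (c :: rest) = [] :: splits ((c :: rest).drop 3) := by
          rw [splits.eq_def]; simp [hp]
        rw [hs]
        simp [mapHead, pvTQ]
        cases splits (List.drop 2 rest) <;> simp
      · rw [if_neg hp, ih _ _ _ (by simp at h ⊢; omega)]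
        have hs : splits (c :: rest) = mapHead (c :: ·) (splits rest) := by
          rw [splits.eq_def]; simp [hp]
        rw [hs]
        cases splits rest <;> simp [mapHead]

lemma splitOn_eq_splits (l : List Char) : PySem.Chars.splitOn l pvTQ = splits l := by
  rw [PySem.Chars.splitOn, go_eq _ _ _ _ (by omega)]
  cases splits l <;> simp [mapHead]

lemma find_eq_of (l sub : List Char) (n : Nat) (h1 : sub <+: l.drop n)
    (h2 : ∀ i < n, ¬ sub <+: l.drop i) : PySem.Chars.find l sub = n := by
  have hinf : sub <:+: l := h1.isInfix.trans (List.drop_suffix n l).isInfix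
  have h0 : 0 ≤ PySem.Chars.find l sub := (PySem.Chars.find_nonneg_iff l sub).mpr hinf
  obtain ⟨hpre, hmin⟩ := PySem.Chars.find_spec h0
  rcases lt_trichotomy (PySem.Chars.find l sub).toNat n with hlt | heq | hgt
  · exact absurd hpre (h2 _ hlt)
  · omega
  · exact absurd h1 (hmin n hgt)

lemma splits_no (l : List Char) (h : ¬ pvTQ <:+: l) : splits l = [l] := by
  fun_induction splits l with
  | case1 => rfl
  | case2 c rest hp ih =>
    exact absurd ((List.isPrefixOf_iff_prefix.mp hp).isInfix) h
  | case3 c rest hp ih =>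
    have : ¬ pvTQ <:+: rest := fun hi => h (hi.trans (List.suffix_cons c rest).isInfix)
    rw [ih this]; rfl

lemma splits_pos (n : Nat) (l : List Char) (h : PySem.Chars.find l pvTQ = n) :
    splits l = l.take n :: splits (l.drop (n + 3)) := by
  induction n generalizing l with
  | zero =>
    have h0 : (0:Int) ≤ PySem.Chars.find l pvTQ := by omega
    obtain ⟨hpre, -⟩ := PySem.Chars.find_spec h0
    rw [h] at hpre; simp at hpre
    cases l with
    | nil => simp [pvTQ] at hpre
    | cons c rest =>
      rw [splits.eq_def]
      simp [List.isPrefixOf_iff_prefix.mpr hpre]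
  | succ n ih =>
    have h0 : (0:Int) ≤ PySem.Chars.find l pvTQ := by rw [h]; positivity
    obtain ⟨hpre, hmin⟩ := PySem.Chars.find_spec h0
    rw [h] at hpre hmin; simp at hpre hmin
    cases l with
    | nil => simp [pvTQ] at hpre
    | cons c rest =>
      have hnp : ¬ pvTQ.isPrefixOf (c :: rest) := by
        intro hp
        exact absurd (List.isPrefixOf_iff_prefix.mp hp) (by simpa using hmin 0 (by omega))
      have hfr : PySem.Chars.find rest pvTQ = (n : Int) := by
        apply find_eq_of
        · simpa using hpre
        · intro i hi
          simpa using hmin (i + 1) (by omega)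
      rw [splits.eq_def]
      simp only [hnp, Bool.false_eq_true, if_false, ih rest hfr]
      rfl

lemma join_nil_eq_flatten (parts : List (List Char)) : PySem.Chars.join [] parts = parts.flatten := by
  induction parts with
  | nil => simp [PySem.Chars.join_nil]
  | cons a r ih =>
    cases r with
    | nil => simp [PySem.Chars.join_singleton]
    | cons b r' => rw [PySem.Chars.join_cons_cons]; simp at ih ⊢; simp [ih]

lemma kept_shift {α : Type} (p : List α) (k : Int) :
    ((PySem.List.enumerate p (k + 2)).filter (fun ip => PySem.Int.mod ip.1 2 == 0)).map (·.2) =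
      ((PySem.List.enumerate p k).filter (fun ip => PySem.Int.mod ip.1 2 == 0)).map (·.2) := by
  induction p generalizing k with
  | nil => rfl
  | cons a r ih =>
    rw [PySem.List.enumerate_cons, PySem.List.enumerate_cons]
    rw [List.filter_cons, List.filter_cons]
    have hm : PySem.Int.mod (k + 2) 2 = PySem.Int.mod k 2 := by
      rw [PySem.Int.mod_eq_emod_of_pos (by norm_num : (0:Int) < 2),
        PySem.Int.mod_eq_emod_of_pos (by norm_num : (0:Int) < 2)]
      omega
    have hshift : k + 2 + 1 = k + 1 + 2 := by ring
    simp only [hshift, hm]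
    split <;> simpa using ih (k + 1)

lemma kept_eq_evens (parts : List (List Char)) :
    ((PySem.List.enumerate parts).filter (fun ip => PySem.Int.mod ip.1 2 == 0)).map (·.2) = evens parts := by
  fun_induction evens parts with
  | case1 => rfl
  | case2 a => rfl
  | case3 a b r ih =>
    show ((PySem.List.enumerate (a :: b :: r) 0).filter _).map _ = _
    rw [PySem.List.enumerate_cons, PySem.List.enumerate_cons]
    rw [List.filter_cons, List.filter_cons]
    have c0 : (PySem.Int.mod ((0:Int), a).1 2 == 0) = true := by rfl
    have c1 : (PySem.Int.mod ((0:Int) + 1, b).1 2 == 0) = false := by rfl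
    have h2 : ((0:Int) + 1 + 1) = 0 + 2 := by ring
    rw [c0, c1, h2]
    simp only [if_true, Bool.false_eq_true, if_false, List.map_cons, kept_shift r 0]
    rw [ih]

lemma pyGetD_neg_one {α : Type} (xs : List α) (d : α) : PySem.List.pyGetD xs (-1) d = xs.getLast?.getD d := by
  cases xs with
  | nil => rfl
  | cons a r => simp [PySem.List.pyGetD, PySem.List.pyGet?, PySem.List.pyIdx?, List.getLast?_eq_getElem?]

lemma bOf_cons_cons (a b : List Char) (r : List (List Char)) (hr : r ≠ []) :
    bOf (a :: b :: r) = a ++ bOf r := by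
  obtain ⟨c, r', rfl⟩ : ∃ c r', r = c :: r' := by
    cases r with | nil => exact absurd rfl hr | cons c r' => exact ⟨c, r', rfl⟩
  unfold bOf
  have hl : (a :: b :: c :: r').length % 2 = (c :: r').length % 2 := by simp; omega
  rw [hl]
  have hg : (a :: b :: c :: r').getLast? = (c :: r').getLast? := by
    rw [List.getLast?_cons_cons, List.getLast?_cons_cons]
  rw [hg]
  split_ifs <;> simp [evens, List.append_assoc]

lemma find_drop_facts (l : List Char) (h : ¬ PySem.Chars.find l pvTQ < 0) :
    PySem.Chars.find l pvTQ = ((PySem.Chars.find l pvTQ).toNat : Int) ∧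
      pvTQ <+: l.drop (PySem.Chars.find l pvTQ).toNat ∧
      (PySem.Chars.find l pvTQ).toNat + 3 ≤ l.length := by
  have h0 : 0 ≤ PySem.Chars.find l pvTQ := by omega
  obtain ⟨hpre, -⟩ := PySem.Chars.find_spec h0
  refine ⟨by omega, hpre, ?_⟩
  have hlen := hpre.length_le
  rw [List.length_drop] at hlen
  have h3 : pvTQ.length = 3 := rfl
  omega

lemma findFrom_branch (l : List Char) (h : ¬ PySem.Chars.find l pvTQ < 0) :
    PySem.Chars.findFrom l pvTQ (PySem.Chars.find l pvTQ + 3) none =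
      (if PySem.Chars.find (l.drop ((PySem.Chars.find l pvTQ).toNat + 3)) pvTQ = -1 then -1
       else ((((PySem.Chars.find l pvTQ).toNat + 3 : Nat) : Int)) +
         PySem.Chars.find (l.drop ((PySem.Chars.find l pvTQ).toNat + 3)) pvTQ) := by
  obtain ⟨hcast, hpre, hk⟩ := find_drop_facts l h
  have harg : PySem.Chars.find l pvTQ + 3 = (((PySem.Chars.find l pvTQ).toNat + 3 : Nat) : Int) := by
    omega
  rw [harg, PySem.Chars.findFrom_natCast l pvTQ _ hk]

lemma drop_eq_tq_append (l : List Char) (n : Nat) (hpre : pvTQ <+: l.drop n) :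
    l.drop n = pvTQ ++ l.drop (n + 3) := by
  obtain ⟨t, ht⟩ := hpre
  have h3 : l.drop (n + 3) = (l.drop n).drop 3 := by rw [List.drop_drop]
  rw [h3, ← ht]
  simp [pvTQ]

lemma main_eq (l : List Char) : (stripLoopA l).flatten = bOf (splits l) := by
  fun_induction stripLoopA l with
  | case1 l h =>
    have hno : ¬ pvTQ <:+: l := fun hi =>
      absurd ((PySem.Chars.find_nonneg_iff l pvTQ).mpr hi) (by omega)
    rw [splits_no l hno]
    simp [bOf, evens]
  | case2 l h1 h2 =>
    obtain ⟨hcast, hpre, hk⟩ := find_drop_facts l h1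
    rw [findFrom_branch l h1] at h2
    set n := (PySem.Chars.find l pvTQ).toNat with hn
    have hneg : PySem.Chars.find (l.drop (n + 3)) pvTQ = -1 := by
      by_contra hne
      rw [if_neg hne] at h2
      have := PySem.Chars.neg_one_le_find (l.drop (n + 3)) pvTQ
      omega
    have hno : ¬ pvTQ <:+: l.drop (n + 3) := (PySem.Chars.find_eq_neg_one_iff _ _).mp hneg
    rw [splits_pos n l hcast, splits_no _ hno]
    have hb : bOf [l.take n, l.drop (n + 3)] = l.take n ++ (pvTQ ++ l.drop (n + 3)) := by
      simp [bOf, evens, List.append_assoc]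
    rw [hb]
    simp only [List.flatten_cons, List.flatten_nil, List.append_nil]
    rw [drop_eq_tq_append l n hpre]
  | case3 l h1 h2 ih =>
    obtain ⟨hcast, hpre, hk⟩ := find_drop_facts l h1
    rw [findFrom_branch l h1] at h2 ih ⊢
    set n := (PySem.Chars.find l pvTQ).toNat with hn
    have hne : PySem.Chars.find (l.drop (n + 3)) pvTQ ≠ -1 := by
      intro he
      rw [if_pos he] at h2
      omega
    rw [if_neg hne] at h2 ih ⊢
    have hm0 : 0 ≤ PySem.Chars.find (l.drop (n + 3)) pvTQ := by
      have := PySem.Chars.neg_one_le_find (l.drop (n + 3)) pvTQ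
      omega
    set m := (PySem.Chars.find (l.drop (n + 3)) pvTQ).toNat with hm
    have hmcast : PySem.Chars.find (l.drop (n + 3)) pvTQ = (m : Int) := by omega
    rw [hmcast] at ih ⊢
    have htoNat : ((((n + 3 : Nat) : Int)) + (m : Int)).toNat + 3 = n + 3 + (m + 3) := by omega
    rw [htoNat] at ih ⊢
    have hdd : l.drop (n + 3 + (m + 3)) = (l.drop (n + 3)).drop (m + 3) := by
      rw [List.drop_drop]
    rw [splits_pos n l hcast, splits_pos m (l.drop (n + 3)) hmcast, ← hdd]
    rw [bOf_cons_cons _ _ _ (splits_ne_nil _)]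
    simp only [List.flatten_cons, ih]

-- ===== VERDICT (by name: the statement is the Claim_ definition above) =====
theorem strip_docstrings_py_spec : Claim_equal_strip_docstrings_py := by
  intro text _
  unfold Spec_strip_docstrings_py strip_docstrings_py strip_docstrings_py_alt
  simp only [splitOn_eq_splits, kept_eq_evens, pyGetD_neg_one, join_nil_eq_flatten, main_eq, bOf]
  split_ifs <;> simp [List.append_assoc]
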